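-- pv_equiv track=rewrite | github.com/opsdanaksaleh/Market-Regime-Liquidity-Model | src/laf_load.py | choose_date_col
-- ===== SOURCE A (Python) =====
-- def choose_date_col(cols):
--     candidates = [c for c in cols if 'date' in c.lower()]
--     if candidates:
--         return candidates[0]
--     # look for common alternate names
--     for c in cols:
--         if any(k in c.lower() for k in ['day','period','week','week ended']):
--             return c
--     # fallback to first column
--     return cols[0]
-- ===== SOURCE B (Python) =====
-- def choose_date_col(cols):
--     alt = None
--     for c in cols:
--         lc = c.lower()
--         if 'date' in lc:
--             return c
--         if alt is None and ('day' in lc or 'period' in lc or 'week' in lc):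
--             alt = c
--     if alt is not None:
--         return alt
--     return cols[0]
-- ===== Notes on version B (the rewrite author's own statement) =====
-- stated objective: simpler
-- what changed: One pass over cols with an alternate-candidate sentinel (returning immediately on the first 'date' match, dropping the redundant 'week ended' keyword) instead of a full filter pass followed by a second keyword scan.
-- outside the precondition, e.g. on choose_date_col([]): A raises IndexError, B raises IndexError
import Mathlib
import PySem

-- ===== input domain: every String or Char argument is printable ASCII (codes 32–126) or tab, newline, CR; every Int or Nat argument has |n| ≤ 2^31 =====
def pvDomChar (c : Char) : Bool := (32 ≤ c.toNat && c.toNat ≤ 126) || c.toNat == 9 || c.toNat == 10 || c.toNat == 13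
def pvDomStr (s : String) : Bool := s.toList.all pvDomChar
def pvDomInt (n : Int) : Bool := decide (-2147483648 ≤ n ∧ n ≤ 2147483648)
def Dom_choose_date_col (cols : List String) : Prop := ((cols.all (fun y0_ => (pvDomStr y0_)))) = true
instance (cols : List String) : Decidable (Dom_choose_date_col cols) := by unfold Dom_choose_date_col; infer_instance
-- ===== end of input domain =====

-- B is a single pass keeping a sentinel for the first alternate-keyword column (and drops the
-- redundant 'week ended' keyword, subsumed by 'week') instead of A's filter pass plus second scan;
-- return-value equivalence on nonempty cols (A and B both raise IndexError on []).

-- ===== PORT A =====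
def choose_date_col (cols : List String) : String :=
  let candidates := cols.filter (fun c => PySem.Str.isIn "date" (PySem.Str.lower c))
  match candidates with
  | c :: _ => c
  | [] =>
    match cols.find? (fun c =>
        ["day", "period", "week", "week ended"].any
          (fun k => PySem.Str.isIn k (PySem.Str.lower c))) with
    | some c => c
    | none => (PySem.List.pyGet? cols 0).getD ""   -- cols[0]; Pre_ excludes the IndexError case

-- ===== PORT B =====
-- the for-loop of Source B, carrying the sentinel `alt` and the original list for the final cols[0]
def pvGoB : List String → Option String → List String → String
  | [], alt, orig =>
    match alt with
    | some a => a
    | none => (PySem.List.pyGet? orig 0).getD ""   -- cols[0]; Pre_ excludes the IndexError case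
  | c :: rest, alt, orig =>
    let lc := PySem.Str.lower c
    if PySem.Str.isIn "date" lc then c
    else
      pvGoB rest
        (if alt.isNone &&
            (PySem.Str.isIn "day" lc || PySem.Str.isIn "period" lc || PySem.Str.isIn "week" lc)
         then some c else alt) orig

def choose_date_col_alt (cols : List String) : String := pvGoB cols none cols

-- ===== PRECONDITION & SPEC =====
-- on cols = [] both Pythons raise IndexError at cols[0]
def Pre_choose_date_col (cols : List String) : Prop := cols ≠ []
instance (cols : List String) : Decidable (Pre_choose_date_col cols) := by
  unfold Pre_choose_date_col; infer_instance

def pvWitness_choose_date_col : List String := (["open", "trade date", "week"])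

def Spec_choose_date_col (cols : List String) (out : String) : Prop := out = choose_date_col_alt cols
instance (cols : List String) (out : String) : Decidable (Spec_choose_date_col cols out) := by
  unfold Spec_choose_date_col; infer_instance

-- ===== CLAIM (what is proved, stated in full; the proofs are below) =====
def Claim_equal_choose_date_col : Prop := ∀ (cols : List String), Dom_choose_date_col cols → Pre_choose_date_col cols → Spec_choose_date_col cols (choose_date_col cols)

-- ===== LEMMAS AND PROOFS =====

-- a column containing "week ended" contains "week", so A's four keywords test the same as B's three
theorem pvAltP_eq (c : String) :
    (["day", "period", "week", "week ended"].any
      (fun k => PySem.Str.isIn k (PySem.Str.lower c))) =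
    (PySem.Str.isIn "day" (PySem.Str.lower c) || PySem.Str.isIn "period" (PySem.Str.lower c) ||
      PySem.Str.isIn "week" (PySem.Str.lower c)) := by
  simp only [List.any_cons, List.any_nil, Bool.or_false]
  cases h : PySem.Str.isIn "week ended" (PySem.Str.lower c) with
  | true =>
    have hw : PySem.Str.isIn "week" (PySem.Str.lower c) = true := by
      rw [PySem.Str.isIn_iff_infix] at h ⊢
      exact List.IsInfix.trans (by decide) h
    rw [hw]
    simp only [Bool.or_true]
  | false =>
    rw [Bool.or_false, Bool.or_assoc]

-- the loop of B, unfolded against A's structure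
theorem pvGoB_eq (l : List String) (alt : Option String) (orig : List String) :
    pvGoB l alt orig =
      (match l.filter (fun c => PySem.Str.isIn "date" (PySem.Str.lower c)) with
       | c :: _ => c
       | [] =>
         match alt with
         | some a => a
         | none =>
           match l.find? (fun c =>
               PySem.Str.isIn "day" (PySem.Str.lower c) ||
               PySem.Str.isIn "period" (PySem.Str.lower c) ||
               PySem.Str.isIn "week" (PySem.Str.lower c)) with
           | some c => c
           | none => (PySem.List.pyGet? orig 0).getD "") := by
  induction l generalizing alt with
  | nil => cases alt <;> rfl
  | cons c rest ih =>
    show (if PySem.Str.isIn "date" (PySem.Str.lower c) = true then c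
          else pvGoB rest _ orig) = _
    cases hd : PySem.Chars.isIn ['d', 'a', 't', 'e'] (PySem.Chars.lower c.toList) with
    | true =>
      have hd' : PySem.Str.isIn "date" (PySem.Str.lower c) = true := by simp [hd]
      simp only [List.filter_cons, hd']
      simp
    | false =>
      have hd' : PySem.Str.isIn "date" (PySem.Str.lower c) = false := by simp [hd]
      simp only [List.filter_cons, List.find?_cons, hd']
      rw [if_neg (by simp), ih]
      cases alt with
      | some a =>
        simp only [Option.isNone_some, Bool.false_and]
        simp
      | none =>
        simp only [Option.isNone_none, Bool.true_and]
        cases ha : (PySem.Chars.isIn ['d', 'a', 'y'] (PySem.Chars.lower c.toList) ||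
            PySem.Chars.isIn ['p', 'e', 'r', 'i', 'o', 'd'] (PySem.Chars.lower c.toList) ||
            PySem.Chars.isIn ['w', 'e', 'e', 'k'] (PySem.Chars.lower c.toList)) with
        | true =>
          have ha' : (PySem.Str.isIn "day" (PySem.Str.lower c) ||
              PySem.Str.isIn "period" (PySem.Str.lower c) ||
              PySem.Str.isIn "week" (PySem.Str.lower c)) = true := by simp [← ha]
          simp only [ha']
          cases hf : List.filter (fun c => PySem.Str.isIn "date" (PySem.Str.lower c)) rest <;>
            simp
        | false =>
          have ha' : (PySem.Str.isIn "day" (PySem.Str.lower c) ||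
              PySem.Str.isIn "period" (PySem.Str.lower c) ||
              PySem.Str.isIn "week" (PySem.Str.lower c)) = false := by simp at ha ⊢; simp [ha]
          simp only [ha']
          simp

-- ===== VERDICT (by name: the statement is the Claim_ definition above) =====
theorem choose_date_col_spec : Claim_equal_choose_date_col := by
  intro cols _ _
  unfold Spec_choose_date_col choose_date_col choose_date_col_alt
  rw [pvGoB_eq]
  simp only [pvAltP_eq]
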